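-- pv_equiv track=rewrite | github.com/ffdumont/skyweb | core/services/weather_service.py | _altitude_to_pressure
-- ===== SOURCE A (Python) =====
-- def _altitude_to_pressure(altitude_ft: int) -> int:
--     """Convert altitude in feet to nearest available pressure level.
--
--     Open-Meteo supports: 1000, 975, 950, 925, 900, 850, 800, 700, 600, 500, ...
--     """
--     # Standard atmosphere approximation
--     pressure_map = [
--         (0, 1000),
--         (1500, 950),
--         (3000, 925),
--         (4500, 900),
--         (6000, 850),
--         (8000, 800),
--         (10000, 700),
--         (14000, 600),
--         (18000, 500),
--     ]
--
--     for alt, pressure in reversed(pressure_map):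
--         if altitude_ft >= alt:
--             return pressure
--     return 1000
-- ===== SOURCE B (Python) =====
-- import bisect
--
-- _THRESHOLDS = [0, 1500, 3000, 4500, 6000, 8000, 10000, 14000, 18000]
-- _PRESSURES  = [1000, 950, 925, 900, 850, 800, 700, 600, 500]
--
-- def _altitude_to_pressure(altitude_ft: int) -> int:
--     """Convert altitude in feet to nearest available pressure level."""
--     idx = bisect.bisect_right(_THRESHOLDS, altitude_ft)
--     return _PRESSURES[max(idx - 1, 0)]
-- ===== Notes on version B (the rewrite author's own statement) =====
-- stated objective: idiomatic
-- what changed: Replaced the reversed linear scan over (threshold, pressure) pairs by a binary search (bisect.bisect_right) over a sorted threshold list with a parallel pressure list.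
import Mathlib
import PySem

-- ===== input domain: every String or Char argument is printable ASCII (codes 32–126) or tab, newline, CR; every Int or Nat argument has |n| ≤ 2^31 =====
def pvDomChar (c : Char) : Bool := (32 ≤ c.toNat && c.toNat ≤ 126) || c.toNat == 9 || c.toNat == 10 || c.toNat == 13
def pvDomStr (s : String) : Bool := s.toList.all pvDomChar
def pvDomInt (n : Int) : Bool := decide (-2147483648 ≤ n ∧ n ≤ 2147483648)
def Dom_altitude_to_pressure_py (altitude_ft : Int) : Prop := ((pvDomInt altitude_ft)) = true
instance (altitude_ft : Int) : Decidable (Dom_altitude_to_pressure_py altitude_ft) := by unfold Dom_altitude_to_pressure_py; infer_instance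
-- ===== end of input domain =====

-- B replaces A's reversed linear scan of the (threshold, pressure) table with a
-- binary search (bisect_right) over a sorted threshold list and a parallel pressure list.

-- ===== PORT A =====
-- the pressure_map table of A
def pvPressureMap : List (Int × Int) :=
  [(0, 1000), (1500, 950), (3000, 925), (4500, 900), (6000, 850),
   (8000, 800), (10000, 700), (14000, 600), (18000, 500)]

-- the 'for alt, pressure in reversed(pressure_map): if altitude_ft >= alt: return pressure' loop
def pvScanA (altitude_ft : Int) : List (Int × Int) → Int
  | [] => 1000
  | (alt, pressure) :: rest =>
      if altitude_ft ≥ alt then pressure else pvScanA altitude_ft rest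

def altitude_to_pressure_py (altitude_ft : Int) : Int :=
  pvScanA altitude_ft pvPressureMap.reverse

-- ===== PORT B =====
def pvThresholds : List Int := [0, 1500, 3000, 4500, 6000, 8000, 10000, 14000, 18000]
def pvPressures : List Int := [1000, 950, 925, 900, 850, 800, 700, 600, 500]

-- bisect.bisect_right: binary search, hand-ported (exact on any sorted list)
def pvBisectRight (xs : List Int) (x : Int) (lo hi : Nat) : Nat :=
  if _h : lo < hi then
    let mid := (lo + hi) / 2
    if x < xs.getD mid 0 then pvBisectRight xs x lo mid
    else pvBisectRight xs x (mid + 1) hi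
  else lo
termination_by hi - lo
decreasing_by all_goals omega

def altitude_to_pressure_py_alt (altitude_ft : Int) : Int :=
  let idx := pvBisectRight pvThresholds altitude_ft 0 pvThresholds.length
  pvPressures.getD (max (idx - 1) 0) 0

-- ===== PRECONDITION & SPEC =====
def Spec_altitude_to_pressure_py (altitude_ft : Int) (out : Int) : Prop := out = altitude_to_pressure_py_alt altitude_ft
instance (altitude_ft : Int) (out : Int) : Decidable (Spec_altitude_to_pressure_py altitude_ft out) := by unfold Spec_altitude_to_pressure_py; infer_instance

-- ===== CLAIM (what is proved, stated in full; the proofs are below) =====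
def Claim_equal_altitude_to_pressure_py : Prop := ∀ (altitude_ft : Int), Dom_altitude_to_pressure_py altitude_ft → Spec_altitude_to_pressure_py altitude_ft (altitude_to_pressure_py altitude_ft)

-- ===== LEMMAS AND PROOFS =====

-- ===== VERDICT (by name: the statement is the Claim_ definition above) =====
theorem altitude_to_pressure_py_spec : Claim_equal_altitude_to_pressure_py := by
  intro a _
  unfold Spec_altitude_to_pressure_py altitude_to_pressure_py altitude_to_pressure_py_alt
  simp only [pvPressureMap, pvThresholds, pvPressures, List.reverse, List.reverseAux,
    List.length]
  by_cases h0 : 18000 ≤ a <;> by_cases h1 : 14000 ≤ a <;> by_cases h2 : 10000 ≤ a <;>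
    by_cases h3 : 8000 ≤ a <;> by_cases h4 : 6000 ≤ a <;> by_cases h5 : 4500 ≤ a <;>
    by_cases h6 : 3000 ≤ a <;> by_cases h7 : 1500 ≤ a <;> by_cases h8 : 0 ≤ a <;>
    first
      | omega
      | (repeat first
          | rw [if_pos (by omega)]
          | rw [if_neg (by omega)]
          | rw [pvScanA]
          | (rw [pvBisectRight]; norm_num [List.getD]))
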